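-- pv_equiv track=rewrite | github.com/senuamedia/lab | validation/cgeom_independent.py | enumerate_modes
-- ===== SOURCE A (Python) =====
-- def enumerate_modes(N):
--     """Enumerate all k ∈ Z³ with 0 < |k| ≤ N."""
--     modes = []
--     for kx in range(-N, N+1):
--         for ky in range(-N, N+1):
--             for kz in range(-N, N+1):
--                 k2 = kx*kx + ky*ky + kz*kz
--                 if 0 < k2 <= N*N:
--                     modes.append((kx, ky, kz))
--     return modes
-- ===== SOURCE B (Python) =====
-- def _isqrt(n):
--     m = 0
--     while (m + 1) * (m + 1) <= n:
--         m += 1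
--     return m
--
--
-- def enumerate_modes(N):
--     """Enumerate all k in Z^3 with 0 < |k| <= N."""
--     modes = []
--     for kx in range(-N, N + 1):
--         for ky in range(-N, N + 1):
--             r2 = N * N - kx * kx - ky * ky
--             if r2 < 0:
--                 continue
--             m = _isqrt(r2)
--             for kz in range(-m, m + 1):
--                 if not (kx == 0 and ky == 0 and kz == 0):
--                     modes.append((kx, ky, kz))
--     return modes
-- ===== Notes on version B (the rewrite author's own statement) =====
-- stated objective: alternative
-- what changed: B replaces the full cube scan over kz by computing per (kx,ky)-column the sphere's exact extent m (integer square root of N*N-kx*kx-ky*ky, skipping columns outside the sphere) and enumerating only kz in [-m,m], excluding the origin explicitly.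
import Mathlib
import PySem

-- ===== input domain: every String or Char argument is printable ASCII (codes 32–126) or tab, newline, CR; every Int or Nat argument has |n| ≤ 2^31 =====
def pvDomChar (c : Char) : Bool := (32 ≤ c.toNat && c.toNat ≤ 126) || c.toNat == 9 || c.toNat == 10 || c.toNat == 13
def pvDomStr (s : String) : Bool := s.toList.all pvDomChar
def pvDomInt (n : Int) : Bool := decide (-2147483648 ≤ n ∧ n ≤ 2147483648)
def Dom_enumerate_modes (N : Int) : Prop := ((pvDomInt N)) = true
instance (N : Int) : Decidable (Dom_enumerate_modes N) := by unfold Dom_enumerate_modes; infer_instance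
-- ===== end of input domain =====

-- B restricts the inner kz loop to the sphere's exact extent per (kx,ky) column via an integer
-- square root, instead of scanning the full cube (an alternative enumeration, same output order).

-- ===== PORT A =====
def enumerate_modes (N : Int) : List (Int × Int × Int) :=
  (PySem.List.pyRange (-N) (N+1) 1).foldl (fun acc kx =>
    (PySem.List.pyRange (-N) (N+1) 1).foldl (fun acc ky =>
      (PySem.List.pyRange (-N) (N+1) 1).foldl (fun acc kz =>
        if 0 < kx*kx + ky*ky + kz*kz ∧ kx*kx + ky*ky + kz*kz ≤ N*N then
          acc ++ [(kx, ky, kz)]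
        else acc) acc) acc) []

-- ===== PORT B =====
-- hand-written integer sqrt of Source B: smallest m with (m+1)^2 > n (exact for n ≥ 0)
def isqrtLoop (n m : Nat) : Nat :=
  if h : (m+1)*(m+1) ≤ n then isqrtLoop n (m+1) else m
termination_by n - m*m
decreasing_by
  have hm : m*m < (m+1)*(m+1) := by nlinarith
  omega

def enumerate_modes_alt (N : Int) : List (Int × Int × Int) :=
  (PySem.List.pyRange (-N) (N+1) 1).foldl (fun acc kx =>
    (PySem.List.pyRange (-N) (N+1) 1).foldl (fun acc ky =>
      let r2 := N*N - kx*kx - ky*ky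
      if r2 < 0 then acc
      else
        let m : Int := (isqrtLoop r2.toNat 0 : Int)
        (PySem.List.pyRange (-m) (m+1) 1).foldl (fun acc kz =>
          if ¬(kx = 0 ∧ ky = 0 ∧ kz = 0) then acc ++ [(kx, ky, kz)] else acc) acc) acc) []

-- ===== PRECONDITION & SPEC =====
def Spec_enumerate_modes (N : Int) (out : List (Int × Int × Int)) : Prop := out = enumerate_modes_alt N
instance (N : Int) (out : List (Int × Int × Int)) : Decidable (Spec_enumerate_modes N out) := by unfold Spec_enumerate_modes; infer_instance

-- ===== CLAIM (what is proved, stated in full; the proofs are below) =====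
def Claim_equal_enumerate_modes : Prop := ∀ (N : Int), Dom_enumerate_modes N → Spec_enumerate_modes N (enumerate_modes N)

-- ===== LEMMAS AND PROOFS =====

-- the kz column produced by A for a fixed (kx, ky)
def colA (N kx ky : Int) : List (Int × Int × Int) :=
  ((PySem.List.pyRange (-N) (N+1) 1).filter
      (fun kz => decide (0 < kx*kx + ky*ky + kz*kz ∧ kx*kx + ky*ky + kz*kz ≤ N*N))).map
    (fun kz => (kx, ky, kz))

-- the kz column produced by B for a fixed (kx, ky)
def colB (N kx ky : Int) : List (Int × Int × Int) :=
  if N*N - kx*kx - ky*ky < 0 then []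
  else
    ((PySem.List.pyRange (-((isqrtLoop (N*N - kx*kx - ky*ky).toNat 0 : Nat) : Int))
        (((isqrtLoop (N*N - kx*kx - ky*ky).toNat 0 : Nat) : Int) + 1) 1).filter
      (fun kz => decide ¬(kx = 0 ∧ ky = 0 ∧ kz = 0))).map (fun kz => (kx, ky, kz))

lemma ite_acc_append {c : Prop} [Decidable c] (acc s : List (Int × Int × Int)) :
    (if c then acc else acc ++ s) = acc ++ (if c then [] else s) := by
  split <;> simp

lemma portA_eq (N : Int) :
    enumerate_modes N =
      (PySem.List.pyRange (-N) (N+1) 1).flatMap (fun kx =>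
        (PySem.List.pyRange (-N) (N+1) 1).flatMap (fun ky => colA N kx ky)) := by
  unfold enumerate_modes colA
  simp only [PySem.List.foldl_append_ite, PySem.List.foldl_append_eq_flatMap, List.nil_append]

lemma portB_eq (N : Int) :
    enumerate_modes_alt N =
      (PySem.List.pyRange (-N) (N+1) 1).flatMap (fun kx =>
        (PySem.List.pyRange (-N) (N+1) 1).flatMap (fun ky => colB N kx ky)) := by
  unfold enumerate_modes_alt colB
  simp only [PySem.List.foldl_append_ite, ite_acc_append,
    PySem.List.foldl_append_eq_flatMap, List.nil_append]

lemma isqrtLoop_spec (n m : Nat) (h : m*m ≤ n) :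
    isqrtLoop n m * isqrtLoop n m ≤ n ∧ n < (isqrtLoop n m + 1) * (isqrtLoop n m + 1) := by
  fun_induction isqrtLoop n m with
  | case1 m h' ih => exact ih h'
  | case2 m h' => exact ⟨h, by omega⟩

lemma col_eq (N : Int) (hN : 0 ≤ N) (kx ky : Int) : colA N kx ky = colB N kx ky := by
  unfold colA colB
  by_cases hr : N*N - kx*kx - ky*ky < 0
  · rw [if_pos hr]
    have hnil : ((PySem.List.pyRange (-N) (N+1) 1).filter
        (fun kz => decide (0 < kx*kx + ky*ky + kz*kz ∧ kx*kx + ky*ky + kz*kz ≤ N*N))) = [] := by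
      refine List.filter_eq_nil_iff.mpr ?_
      intro kz _
      simp only [decide_eq_true_eq, not_and, not_le]
      intro _
      nlinarith [mul_self_nonneg kz]
    rw [hnil, List.map_nil]
  · rw [if_neg hr]
    rw [not_lt] at hr
    set r2 : Int := N*N - kx*kx - ky*ky with hr2def
    set m : Nat := isqrtLoop r2.toNat 0 with hm
    obtain ⟨h1, h2⟩ := isqrtLoop_spec r2.toNat 0 (by omega)
    rw [← hm] at h1 h2
    have h1' : (m : Int) * (m : Int) ≤ r2 := by
      have := (Int.toNat_of_nonneg hr : ((r2.toNat : Int) = r2))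
      have hc : ((m*m : Nat) : Int) ≤ (r2.toNat : Int) := by exact_mod_cast h1
      push_cast at hc; omega
    have h2' : r2 < ((m : Int) + 1) * ((m : Int) + 1) := by
      have ht := (Int.toNat_of_nonneg hr : ((r2.toNat : Int) = r2))
      have hc : (r2.toNat : Int) < (((m+1)*(m+1) : Nat) : Int) := by exact_mod_cast h2
      push_cast at hc; omega
    have hmN : (m : Int) ≤ N := by nlinarith
    have hm0 : (0 : Int) ≤ (m : Int) := by positivity
    rw [PySem.List.pyRange_one_append (-N) (-(m : Int)) (N+1) (by omega) (by omega),
        PySem.List.pyRange_one_append (-(m : Int)) ((m : Int)+1) (N+1) (by omega) (by omega)]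
    simp only [List.filter_append, List.map_append]
    have hleft : ((PySem.List.pyRange (-N) (-(m : Int)) 1).filter
        (fun kz => decide (0 < kx*kx + ky*ky + kz*kz ∧ kx*kx + ky*ky + kz*kz ≤ N*N))) = [] := by
      refine List.filter_eq_nil_iff.mpr ?_
      intro kz hkz
      rw [PySem.List.mem_pyRange_one] at hkz
      simp only [decide_eq_true_eq, not_and, not_le]
      intro _
      nlinarith [hkz.1, hkz.2]
    have hright : ((PySem.List.pyRange ((m : Int)+1) (N+1) 1).filter
        (fun kz => decide (0 < kx*kx + ky*ky + kz*kz ∧ kx*kx + ky*ky + kz*kz ≤ N*N))) = [] := by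
      refine List.filter_eq_nil_iff.mpr ?_
      intro kz hkz
      rw [PySem.List.mem_pyRange_one] at hkz
      simp only [decide_eq_true_eq, not_and, not_le]
      intro _
      nlinarith [hkz.1, hkz.2]
    have hmid : ((PySem.List.pyRange (-(m : Int)) ((m : Int)+1) 1).filter
          (fun kz => decide (0 < kx*kx + ky*ky + kz*kz ∧ kx*kx + ky*ky + kz*kz ≤ N*N)))
        = ((PySem.List.pyRange (-(m : Int)) ((m : Int)+1) 1).filter
          (fun kz => decide ¬(kx = 0 ∧ ky = 0 ∧ kz = 0))) := by
      refine List.filter_congr ?_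
      intro kz hkz
      rw [PySem.List.mem_pyRange_one] at hkz
      have hsq : kz*kz ≤ (m : Int) * (m : Int) := by nlinarith [hkz.1, hkz.2]
      simp only [decide_eq_decide]
      constructor
      · rintro ⟨hpos, -⟩ ⟨e1, e2, e3⟩
        subst e1; subst e2; subst e3
        simp at hpos
      · intro hno
        refine ⟨?_, by nlinarith⟩
        have hne : kx ≠ 0 ∨ ky ≠ 0 ∨ kz ≠ 0 := by tauto
        rcases hne with h | h | h <;>
          nlinarith [mul_self_pos.mpr h, mul_self_nonneg kx, mul_self_nonneg ky,
            mul_self_nonneg kz]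
    rw [hleft, hright, hmid, List.map_nil]
    simp

-- ===== VERDICT (by name: the statement is the Claim_ definition above) =====
theorem enumerate_modes_spec : Claim_equal_enumerate_modes := by
  intro N _
  unfold Spec_enumerate_modes
  rw [portA_eq, portB_eq]
  by_cases hN : 0 ≤ N
  · simp only [col_eq N hN]
  · rw [PySem.List.pyRange_one_eq_nil (by omega : N + 1 ≤ -N)]
    simp
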